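-- pv_equiv track=rewrite | github.com/jessex/pulse-data | recidiviz/airflow/dags/raw_data/utils.py | n_evenly_weighted_buckets
-- ===== SOURCE A (Python) =====
-- import heapq
-- from typing import Callable, Iterable, List, Optional, Tuple, TypeVar
--
-- T = TypeVar("T")
--
-- def n_evenly_weighted_buckets(
--     items_and_weight: List[Tuple[T, int]], n: int
-- ) -> List[List[T]]:
--     """Constructs at most |n| approximately even weighted buckets from
--     |items_and_weight|
--     """
--     if n <= 0:
--         raise ValueError(f"Expected n to be greater than or equal to 0; got {n}")
--
--     sorted_items = list(sorted(items_and_weight, key=lambda x: x[1], reverse=True))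
--     num_buckets = min(len(sorted_items), n)
--     buckets: List[List[T]] = [[] for _ in range(num_buckets)]
--     heap = [(0, bucket_index) for bucket_index in range(num_buckets)]
--     heapq.heapify(heap)
--
--     for item, weight in sorted_items:
--         bucket_size, bucket_index = heapq.heappop(heap)
--         buckets[bucket_index].append(item)
--         heapq.heappush(heap, (bucket_size + weight, bucket_index))
--
--     return buckets
-- ===== SOURCE B (Python) =====
-- def n_evenly_weighted_buckets(items_and_weight, n):
--     """Same distribution as the heap version, but with a plain running
--     `sizes` list: each item goes to the first bucket of minimal total weight
--     (exactly the heap's (size, index) tie-break)."""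
--     if n <= 0:
--         raise ValueError(f"Expected n to be greater than or equal to 0; got {n}")
--     sorted_items = sorted(items_and_weight, key=lambda x: x[1], reverse=True)
--     num_buckets = min(len(sorted_items), n)
--     buckets = [[] for _ in range(num_buckets)]
--     sizes = [0] * num_buckets
--     for item, weight in sorted_items:
--         best = 0
--         for i in range(num_buckets):
--             if sizes[i] < sizes[best]:
--                 best = i
--         buckets[best].append(item)
--         sizes[best] += weight
--     return buckets
-- ===== Notes on version B (the rewrite author's own statement) =====
-- stated objective: simpler
-- what changed: Replaces the heapq priority queue with a plain running sizes list and a linear min-scan per item (first bucket of minimal size, reproducing the heap's (size, index) tie-break).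
import Mathlib
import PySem

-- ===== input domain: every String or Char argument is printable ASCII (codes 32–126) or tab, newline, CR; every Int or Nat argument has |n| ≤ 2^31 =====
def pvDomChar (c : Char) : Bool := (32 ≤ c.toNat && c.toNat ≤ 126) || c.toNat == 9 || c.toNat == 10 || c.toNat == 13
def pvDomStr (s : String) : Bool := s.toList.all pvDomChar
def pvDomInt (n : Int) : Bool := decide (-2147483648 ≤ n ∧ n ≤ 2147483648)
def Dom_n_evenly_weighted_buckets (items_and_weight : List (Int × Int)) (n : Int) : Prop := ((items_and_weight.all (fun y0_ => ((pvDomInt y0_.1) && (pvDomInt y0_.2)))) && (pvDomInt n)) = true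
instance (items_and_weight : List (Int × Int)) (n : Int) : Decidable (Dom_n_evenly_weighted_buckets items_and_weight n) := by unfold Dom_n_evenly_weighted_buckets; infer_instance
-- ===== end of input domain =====

-- B replaces A's heapq priority queue with a plain running `sizes` list and a
-- linear first-minimum scan per item (same buckets, simpler mechanism).

-- ===== PORT A =====
-- Python tuple comparison (size, index) < (size', index'): strict lexicographic order.
def pairLt (a b : Int × Int) : Bool := decide (a.1 < b.1 ∨ (a.1 = b.1 ∧ a.2 < b.2))

-- The heapq calls are ported by their exact semantics: the heap is the list of pending
-- (size, index) pairs; heappop returns the lexicographically least pair (unique here,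
-- since indices are distinct) and removes it; heappush appends the new pair.  The
-- internal array order of CPython's heap is not observable in the returned buckets.
def loopA (items : List (Int × Int)) (buckets : List (List Int)) (heap : List (Int × Int)) :
    List (List Int) × List (Int × Int) :=
  match items with
  | [] => (buckets, heap)
  | (item, weight) :: rest =>
    match heap with
    | [] => (buckets, heap)  -- heappop([]) would raise IndexError; unreachable (heap nonempty whenever items remain)
    | x :: xs =>
      let m := xs.foldl (fun best a => if pairLt a best then a else best) x  -- heappop: the least pair
      loopA rest (buckets.modify m.2.toNat (fun l => l ++ [item]))
        ((x :: xs).erase m ++ [(m.1 + weight, m.2)])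

def n_evenly_weighted_buckets (items_and_weight : List (Int × Int)) (n : Int) : List (List Int) :=
  if n ≤ 0 then []  -- Python raises ValueError here; excluded by Pre_
  else
    let sortedItems := PySem.List.sorted items_and_weight (fun x => x.2) true
    let numBuckets : Nat := min sortedItems.length n.toNat
    let buckets : List (List Int) := (List.range numBuckets).map (fun _ => [])
    let heap : List (Int × Int) := (List.range numBuckets).map (fun i : Nat => ((0 : Int), (i : Int)))
    (loopA sortedItems buckets heap).1

-- ===== PORT B =====
-- first index of a minimal element of sizes (the inner `for i in range(num_buckets)` scan)
def argminIdx (sizes : List Int) : Nat :=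
  (List.range sizes.length).foldl
    (fun best i => if sizes.getD i 0 < sizes.getD best 0 then i else best) 0

def loopB (items : List (Int × Int)) (buckets : List (List Int)) (sizes : List Int) :
    List (List Int) × List Int :=
  match items with
  | [] => (buckets, sizes)
  | (item, weight) :: rest =>
    let best := argminIdx sizes
    loopB rest (buckets.modify best (fun l => l ++ [item])) (sizes.modify best (fun v => v + weight))

def n_evenly_weighted_buckets_alt (items_and_weight : List (Int × Int)) (n : Int) : List (List Int) :=
  if n ≤ 0 then []  -- Python raises ValueError here; excluded by Pre_
  else
    let sortedItems := PySem.List.sorted items_and_weight (fun x => x.2) true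
    let numBuckets : Nat := min sortedItems.length n.toNat
    let buckets : List (List Int) := (List.range numBuckets).map (fun _ => [])
    let sizes : List Int := List.replicate numBuckets 0
    (loopB sortedItems buckets sizes).1

-- ===== PRECONDITION & SPEC =====
-- Pre_ excludes exactly n ≤ 0, where the Python A raises ValueError.
def Pre_n_evenly_weighted_buckets (items_and_weight : List (Int × Int)) (n : Int) : Prop := 1 ≤ n
instance (items_and_weight : List (Int × Int)) (n : Int) : Decidable (Pre_n_evenly_weighted_buckets items_and_weight n) := by unfold Pre_n_evenly_weighted_buckets; infer_instance
def pvWitness_n_evenly_weighted_buckets : (List (Int × Int)) × Int := ([(1, 2), (2, 1), (3, 3)], 2)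

def Spec_n_evenly_weighted_buckets (items_and_weight : List (Int × Int)) (n : Int) (out : List (List Int)) : Prop := out = n_evenly_weighted_buckets_alt items_and_weight n
instance (items_and_weight : List (Int × Int)) (n : Int) (out : List (List Int)) : Decidable (Spec_n_evenly_weighted_buckets items_and_weight n out) := by unfold Spec_n_evenly_weighted_buckets; infer_instance

-- ===== CLAIM (what is proved, stated in full; the proofs are below) =====
def Claim_equal_n_evenly_weighted_buckets : Prop := ∀ (items_and_weight : List (Int × Int)) (n : Int), Dom_n_evenly_weighted_buckets items_and_weight n → Pre_n_evenly_weighted_buckets items_and_weight n → Spec_n_evenly_weighted_buckets items_and_weight n (n_evenly_weighted_buckets items_and_weight n)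

-- ===== LEMMAS AND PROOFS =====

theorem pairLt_irrefl (a : Int × Int) : pairLt a a = false := by
  simp [pairLt]

theorem pairLt_trans {a b c : Int × Int} (h1 : pairLt a b = true) (h2 : pairLt b c = true) :
    pairLt a c = true := by
  obtain ⟨a1, a2⟩ := a; obtain ⟨b1, b2⟩ := b; obtain ⟨c1, c2⟩ := c
  simp only [pairLt, decide_eq_true_eq] at *
  omega

theorem pairLt_false_trans {a b c : Int × Int} (h1 : pairLt a b = false) (h2 : pairLt b c = false) :
    pairLt a c = false := by
  obtain ⟨a1, a2⟩ := a; obtain ⟨b1, b2⟩ := b; obtain ⟨c1, c2⟩ := c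
  simp only [pairLt, decide_eq_false_iff_not] at *
  omega

theorem pairLt_antisymm {a b : Int × Int} (h1 : pairLt a b = false) (h2 : pairLt b a = false) :
    a = b := by
  obtain ⟨a1, a2⟩ := a; obtain ⟨b1, b2⟩ := b
  simp only [pairLt, decide_eq_false_iff_not, Prod.mk.injEq] at *
  omega

-- the fold in loopA returns an element of x :: xs that no element is lexicographically below
theorem minfold_spec (xs : List (Int × Int)) (x : Int × Int) :
    (xs.foldl (fun best a => if pairLt a best then a else best) x) ∈ x :: xs ∧
    ∀ y ∈ x :: xs, pairLt y (xs.foldl (fun best a => if pairLt a best then a else best) x) = false := by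
  induction xs generalizing x with
  | nil => simpa using pairLt_irrefl x
  | cons z t ih =>
    simp only [List.foldl_cons]
    by_cases hz : pairLt z x = true
    · rw [if_pos hz]
      obtain ⟨hmem, hmin⟩ := ih z
      refine ⟨?_, ?_⟩
      · rcases List.mem_cons.1 hmem with h | h
        · simp [h]
        · simp [List.mem_cons, h]
      · intro y hy
        rcases List.mem_cons.1 hy with rfl | hy'
        · -- y = x : z < x and z not below result forbid x below result
          have hzr := hmin z (List.mem_cons_self)
          by_contra hx
          have hx' : pairLt y (t.foldl (fun best a => if pairLt a best then a else best) z) = true := by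
            revert hx; cases pairLt y (t.foldl (fun best a => if pairLt a best then a else best) z) <;> simp
          have := pairLt_trans hz hx'
          rw [this] at hzr; exact absurd hzr (by simp)
        · exact hmin y hy'
    · rw [if_neg hz]
      have hz' : pairLt z x = false := by revert hz; cases pairLt z x <;> simp
      obtain ⟨hmem, hmin⟩ := ih x
      refine ⟨?_, ?_⟩
      · rcases List.mem_cons.1 hmem with h | h
        · simp [h]
        · simp [List.mem_cons, h]
      · intro y hy
        rcases List.mem_cons.1 hy with rfl | hy'
        · exact hmin y List.mem_cons_self
        · rcases List.mem_cons.1 hy' with rfl | hy''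
          · exact pairLt_false_trans hz' (hmin x List.mem_cons_self)
          · exact hmin y (List.mem_cons_of_mem _ hy'')

-- (value, index) enumeration of the sizes list, starting at index i
def enumAux (i : Int) : List Int → List (Int × Int)
  | [] => []
  | v :: rest => (v, i) :: enumAux (i + 1) rest

theorem length_enumAux (i : Int) (s : List Int) : (enumAux i s).length = s.length := by
  induction s generalizing i with
  | nil => rfl
  | cons v rest ih => simp [enumAux, ih]

theorem mem_enumAux {x : Int × Int} {s : List Int} {i : Int} :
    x ∈ enumAux i s ↔ ∃ j, j < s.length ∧ x = (s.getD j 0, i + (j : Int)) := by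
  induction s generalizing i with
  | nil => simp [enumAux]
  | cons v rest ih =>
    simp only [enumAux, List.mem_cons, ih]
    constructor
    · rintro (rfl | ⟨j, hj, rfl⟩)
      · exact ⟨0, by simp⟩
      · exact ⟨j + 1, by simpa using hj, by simp; ring⟩
    · rintro ⟨j, hj, rfl⟩
      cases j with
      | zero => simp
      | succ j => right; exact ⟨j, by simpa using hj, by simp; ring⟩

theorem argminIdx_spec (s : List Int) (h0 : 0 < s.length) :
    argminIdx s < s.length ∧ (∀ i, i < s.length → s.getD (argminIdx s) 0 ≤ s.getD i 0) ∧
      (∀ i, i < argminIdx s → s.getD i 0 > s.getD (argminIdx s) 0) := by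
  have key : ∀ n, n ≤ s.length →
      ((List.range n).foldl (fun best i => if s.getD i 0 < s.getD best 0 then i else best) 0) < s.length ∧
      (∀ i, i < n → s.getD ((List.range n).foldl (fun best i => if s.getD i 0 < s.getD best 0 then i else best) 0) 0 ≤ s.getD i 0) ∧
      (∀ i, i < (List.range n).foldl (fun best i => if s.getD i 0 < s.getD best 0 then i else best) 0 →
        s.getD i 0 > s.getD ((List.range n).foldl (fun best i => if s.getD i 0 < s.getD best 0 then i else best) 0) 0) := by
    intro n
    induction n with
    | zero =>
      intro _
      simp only [List.range_zero, List.foldl_nil]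
      exact ⟨h0, by omega, by omega⟩
    | succ n ih =>
      intro hn
      obtain ⟨hr, hle, hstrict⟩ := ih (by omega)
      rw [List.range_succ, List.foldl_append, List.foldl_cons, List.foldl_nil]
      set r := (List.range n).foldl (fun best i => if s.getD i 0 < s.getD best 0 then i else best) 0 with hrdef
      by_cases hc : s.getD n 0 < s.getD r 0
      · rw [if_pos hc]
        refine ⟨by omega, ?_, ?_⟩
        · intro i hi
          rcases Nat.lt_succ_iff_lt_or_eq.1 hi with hi' | rfl
          · have := hle i hi'; omega
          · omega
        · intro i hi
          have := hle i (by omega); omega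
      · rw [if_neg hc]
        refine ⟨hr, ?_, hstrict⟩
        intro i hi
        rcases Nat.lt_succ_iff_lt_or_eq.1 hi with hi' | rfl
        · exact hle i hi'
        · omega
  exact key s.length le_rfl

-- the lexicographic minimum of the enumerated sizes is (sizes[argmin], argmin)
theorem enum_min_not_lt (s : List Int) (h0 : 0 < s.length) :
    ∀ y ∈ enumAux 0 s, pairLt y (s.getD (argminIdx s) 0, (argminIdx s : Int)) = false := by
  obtain ⟨hr, hle, hstrict⟩ := argminIdx_spec s h0
  intro y hy
  obtain ⟨j, hj, rfl⟩ := mem_enumAux.1 hy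
  have hle' := hle j hj
  simp only [pairLt, decide_eq_false_iff_not, zero_add]
  rintro (h | ⟨heq, hlt⟩)
  · omega
  · have hjlt : j < argminIdx s := by exact_mod_cast hlt
    have := hstrict j hjlt; omega

theorem argmin_mem_enum (s : List Int) (h0 : 0 < s.length) :
    (s.getD (argminIdx s) 0, (argminIdx s : Int)) ∈ enumAux 0 s := by
  obtain ⟨hr, _, _⟩ := argminIdx_spec s h0
  exact mem_enumAux.2 ⟨argminIdx s, hr, by simp⟩

-- removing position j from the enumeration and re-adding it with updated size
-- is a permutation of the enumeration of the updated sizes list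
theorem enum_update_perm (s : List Int) (w : Int) :
    ∀ (j : Nat) (i : Int), j < s.length →
    ((enumAux i s).erase (s.getD j 0, i + (j : Int)) ++ [(s.getD j 0 + w, i + (j : Int))]).Perm
      (enumAux i (s.modify j (fun v => v + w))) := by
  induction s with
  | nil => intro j i hj; simp at hj
  | cons v rest ih =>
    intro j i hj
    cases j with
    | zero =>
      have hmod : (v :: rest).modify 0 (fun x => x + w) = (v + w) :: rest := by simp
      rw [hmod]
      simp only [enumAux, List.getD_cons_zero, Nat.cast_zero, add_zero]
      rw [List.erase_cons_head]
      exact List.perm_append_singleton _ _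
    | succ j =>
      have hmod : (v :: rest).modify (j + 1) (fun x => x + w) = v :: rest.modify j (fun x => x + w) := by
        simp
      have hgd : (v :: rest).getD (j + 1) 0 = rest.getD j 0 := rfl
      have hcast : i + ((j + 1 : Nat) : Int) = (i + 1) + (j : Int) := by push_cast; ring
      rw [hmod, hgd, hcast]
      have hne : ¬((((v, i)) : Int × Int) == (rest.getD j 0, (i + 1) + (j : Int))) = true := by
        simp only [beq_iff_eq, Prod.mk.injEq, not_and]
        intro _; omega
      simp only [enumAux, List.erase_cons_tail hne, List.cons_append]
      exact (ih j (i + 1) (by simpa using hj)).cons _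

theorem loopB_nil_state : ∀ items, loopB items [] [] = ([], []) := by
  intro items
  induction items with
  | nil => rfl
  | cons p rest ih => obtain ⟨item, weight⟩ := p; simpa [loopB, argminIdx] using ih

-- main loop correspondence: heap contents ~ enumerated sizes
theorem loop_eq : ∀ (items : List (Int × Int)) (b : List (List Int)) (s : List Int)
    (h : List (Int × Int)), h.Perm (enumAux 0 s) → b.length = s.length →
    (loopA items b h).1 = (loopB items b s).1 := by
  intro items
  induction items with
  | nil => intro b s h _ _; rfl
  | cons p rest ih =>
    obtain ⟨item, weight⟩ := p
    intro b s h hperm hlen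
    by_cases hs : s = []
    · -- no buckets: both sides keep the (empty) buckets unchanged
      subst hs
      have h0 : h = [] := by simpa [enumAux, List.perm_nil] using hperm
      have hb : b = [] := by simpa using hlen
      subst h0; subst hb
      simp [loopA, loopB_nil_state]
    · have hs0 : 0 < s.length := by
        cases s with
        | nil => exact absurd rfl hs
        | cons _ _ => simp
      have hh : h ≠ [] := by
        intro h0
        apply hs
        have hlen2 := hperm.length_eq
        rw [h0, length_enumAux] at hlen2
        simp only [List.length_nil] at hlen2
        exact List.eq_nil_of_length_eq_zero hlen2.symm
      rcases h with _ | ⟨x, xs⟩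
      · exact absurd rfl hh
      -- identify the popped minimum with (sizes[argmin], argmin)
      have hmc : xs.foldl (fun best a => if pairLt a best then a else best) x
          = (s.getD (argminIdx s) 0, (argminIdx s : Int)) := by
        obtain ⟨hmmem, hmmin⟩ := minfold_spec xs x
        apply pairLt_antisymm
        · exact enum_min_not_lt s hs0 _ (hperm.mem_iff.1 hmmem)
        · exact hmmin _ (hperm.mem_iff.2 (argmin_mem_enum s hs0))
      simp only [loopA, loopB, hmc, Int.toNat_natCast]
      apply ih
      · -- new heap ~ enumeration of updated sizes
        have h1 := (hperm.erase ((s.getD (argminIdx s) 0, (argminIdx s : Int)))).append_right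
          [(s.getD (argminIdx s) 0 + weight, (argminIdx s : Int))]
        have h2 := enum_update_perm s weight (argminIdx s) 0 (argminIdx_spec s hs0).1
        rw [zero_add] at h2
        exact h1.trans h2
      · simp [hlen]

theorem enum_replicate : ∀ (k : Nat) (i : Int),
    enumAux i (List.replicate k 0) = (List.range k).map (fun j : Nat => ((0 : Int), i + (j : Int))) := by
  intro k
  induction k with
  | zero => intro i; rfl
  | succ k ih =>
    intro i
    rw [List.replicate_succ, List.range_succ_eq_map]
    simp only [enumAux, List.map_cons, List.map_map, ih (i + 1)]
    congr 1
    · simp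
    · apply List.map_congr_left
      intro j _
      simp [Function.comp]
      ring

-- ===== VERDICT (by name: the statement is the Claim_ definition above) =====
theorem n_evenly_weighted_buckets_spec : Claim_equal_n_evenly_weighted_buckets := by
  intro items_and_weight n _ hpre
  unfold Spec_n_evenly_weighted_buckets
  have hn : ¬ n ≤ 0 := by unfold Pre_n_evenly_weighted_buckets at hpre; omega
  simp only [n_evenly_weighted_buckets, n_evenly_weighted_buckets_alt, if_neg hn]
  apply loop_eq
  · rw [enum_replicate]
    apply List.Perm.of_eq
    apply List.map_congr_left
    intro j _; simp
  · simp
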